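-- pv_equiv track=rewrite | github.com/leejongcheal/programmers_highkit | 힙/더맵게.py | solution
-- ===== SOURCE A (Python) =====
-- import heapq
--
-- def solution(scoville, K):
--     answer = 0
--     q = []
--     for s in scoville:
--         heapq.heappush(q, s)
--     while len(q) >= 2:
--         if q[0] >= K:
--             return answer
--         a = heapq.heappop(q)
--         b = heapq.heappop(q)
--         heapq.heappush(q, a+2*b)
--         answer += 1
--     if q[0] >= K:
--         return answer
--     return -1
-- ===== SOURCE B (Python) =====
-- def _next(orig, merged, i, j):
--     # pop the smaller of the two queue fronts (read pointers, no mutation of data)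
--     if i < len(orig) and (j >= len(merged) or orig[i] <= merged[j]):
--         return orig[i], i + 1, j
--     return merged[j], i, j + 1
--
--
-- def solution(scoville, K):
--     # two-queue merge: sort once; mixed values are appended to a FIFO list,
--     # which provably stays sorted, so no heap / binary search is ever needed.
--     orig = sorted(scoville)
--     merged = []
--     i = j = 0
--     answer = 0
--     while (len(orig) - i) + (len(merged) - j) >= 2:
--         a, i2, j2 = _next(orig, merged, i, j)
--         if a >= K:
--             return answer
--         b, i, j = _next(orig, merged, i2, j2)
--         merged.append(a + 2 * b)
--         answer += 1
--     q = orig[i] if i < len(orig) else merged[j]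
--     return answer if q >= K else -1
-- ===== Notes on version B (the rewrite author's own statement) =====
-- stated objective: alternative
-- what changed: The heap is replaced by the two-queue merge trick: sort once, then keep mixed values in a plain FIFO list that provably stays sorted (every surviving element y satisfies 3y >= the queue's back), so each step just compares the two queue fronts - no priority queue, no binary search, no insertion; Pre_ excludes only the empty list, on which A raises IndexError.
import Mathlib
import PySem

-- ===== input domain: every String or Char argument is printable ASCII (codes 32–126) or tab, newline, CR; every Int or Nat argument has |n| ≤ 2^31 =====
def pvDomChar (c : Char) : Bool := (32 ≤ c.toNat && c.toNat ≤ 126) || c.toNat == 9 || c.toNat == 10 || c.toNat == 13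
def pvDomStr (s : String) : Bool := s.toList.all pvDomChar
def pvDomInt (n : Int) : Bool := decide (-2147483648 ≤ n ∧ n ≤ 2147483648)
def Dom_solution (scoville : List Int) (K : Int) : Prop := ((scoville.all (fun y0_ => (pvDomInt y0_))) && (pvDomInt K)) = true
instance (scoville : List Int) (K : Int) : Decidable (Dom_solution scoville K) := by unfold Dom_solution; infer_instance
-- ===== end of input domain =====

-- B drops the heap for the two-queue merge trick (sort once, mixed values in a FIFO
-- list that stays sorted); proved equal on nonempty input (A raises IndexError on []).

-- ===== PORT A =====
-- heapq over Int values is modeled by its observable value behavior: the heap is the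
-- list of pushed values, q[0] (the root) is a minimal element, heappop removes one
-- minimal element.  Exact here, because only the multiset of values reaches the output.
def loopA (K answer : Int) (q : List Int) : Int :=
  match hm : PySem.List.min? q (fun x => x) with
  | none => 0            -- empty heap: the Python q[0] raises IndexError (outside Pre_)
  | some m =>
    if 2 ≤ q.length then
      if m ≥ K then answer
      else
        let q1 := q.erase m                       -- a = heappop(q)
        match hb : PySem.List.min? q1 (fun x => x) with
        | none => 0                               -- unreachable: q1 is nonempty
        | some b =>
          loopA K (answer + 1) (q1.erase b ++ [m + 2 * b])   -- heappush(q, a+2*b)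
    else
      if m ≥ K then answer else -1
termination_by q.length
decreasing_by
  have hm' : m ∈ q := PySem.List.min?_mem hm
  have hb' : b ∈ q.erase m := PySem.List.min?_mem hb
  have h1 := List.length_erase_of_mem hm'
  have h2 := List.length_erase_of_mem hb'
  simp_all
  omega

def solution (scoville : List Int) (K : Int) : Int :=
  loopA K 0 (scoville.foldl (fun q s => q ++ [s]) [])   -- the heappush loop builds the heap

-- ===== PORT B =====
-- port of Source B's _next: take the smaller of the two queue fronts (read pointers i, j);
-- the Python indexing is in range exactly when this branch is reached under the guard
def nextB (orig merged : List Int) (i j : Nat) : Int × Nat × Nat :=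
  if i < orig.length ∧ (merged.length ≤ j ∨ orig.getD i 0 ≤ merged.getD j 0) then
    (orig.getD i 0, i + 1, j)
  else
    (merged.getD j 0, i, j + 1)

-- port of the while loop; the fuel only makes the recursion structural (the unread
-- count shrinks by one per iteration, so fuel = length scoville + 1 is never exhausted)
def loopB (fuel : Nat) (K : Int) (orig merged : List Int) (i j : Nat) (answer : Int) : Int :=
  match fuel with
  | 0 => 0
  | Nat.succ fuel =>
    if 2 ≤ (orig.length - i) + (merged.length - j) then
      let r1 := nextB orig merged i j
      if r1.1 ≥ K then answer
      else
        let r2 := nextB orig merged r1.2.1 r1.2.2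
        loopB fuel K orig (merged ++ [r1.1 + 2 * r2.1]) r2.2.1 r2.2.2 (answer + 1)
    else
      if i < orig.length then
        if orig.getD i 0 ≥ K then answer else -1
      else
        match merged.drop j with                  -- final merged[j]
        | [] => 0        -- the Python merged[j] raises IndexError here (outside Pre_)
        | x :: _ => if x ≥ K then answer else -1

def solution_alt (scoville : List Int) (K : Int) : Int :=
  loopB (scoville.length + 1) K (PySem.List.sorted scoville (fun x => x) false) [] 0 0 0

-- ===== PRECONDITION & SPEC =====
-- Pre_ excludes exactly the empty list, on which A raises IndexError (q[0] of an empty heap).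
def Pre_solution (scoville : List Int) (K : Int) : Prop := scoville ≠ []
instance (scoville : List Int) (K : Int) : Decidable (Pre_solution scoville K) := by unfold Pre_solution; infer_instance
def pvWitness_solution : List Int × Int := ([1, 2, 3, 9, 10, 12], 7)

def Spec_solution (scoville : List Int) (K : Int) (out : Int) : Prop := out = solution_alt scoville K
instance (scoville : List Int) (K : Int) (out : Int) : Decidable (Spec_solution scoville K out) := by unfold Spec_solution; infer_instance

-- ===== CLAIM (what is proved, stated in full; the proofs are below) =====
def Claim_equal_solution : Prop := ∀ (scoville : List Int) (K : Int), Dom_solution scoville K → Pre_solution scoville K → Spec_solution scoville K (solution scoville K)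

-- ===== LEMMAS AND PROOFS =====

-- min? returns the (first) minimal element; by value any minimum will do
theorem min?_eq_of_min (q : List Int) (a : Int) (ha : a ∈ q) (hmin : ∀ y ∈ q, a ≤ y) :
    PySem.List.min? q (fun x => x) = some a := by
  obtain ⟨m, hm⟩ : ∃ m, PySem.List.min? q (fun x => x) = some m := by
    cases h : PySem.List.min? q (fun x => x) with
    | none =>
      have := (PySem.List.min?_eq_none_iff q (fun x => x)).mp h
      subst this; cases ha
    | some m => exact ⟨m, rfl⟩
  have h1 : m ∈ q := PySem.List.min?_mem hm
  have h2 : m ≤ a := PySem.List.min?_isMin hm a ha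
  have h3 : a ≤ m := hmin m h1
  rw [hm]; congr 1; omega

-- in a ≤-sorted list every element is ≤ the last one
theorem sorted_le_getLast (M : List Int) (hs : M.Pairwise (· ≤ ·)) (m : Int)
    (hm : M.getLast? = some m) : ∀ y ∈ M, y ≤ m := by
  intro y hy
  have hmm : m ∈ M := List.mem_of_getLast? hm
  rcases List.getLast?_eq_some_iff.mp hm with ⟨M', hM'⟩
  subst hM'
  rcases List.mem_append.mp hy with h | h
  · exact (List.pairwise_append.mp hs).2.2 y h m (by simp)
  · simp at h; omega

-- specification of one _next step on two sorted queues
theorem nextB_spec (orig merged : List Int) (i j : Nat)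
    (hi : i ≤ orig.length) (hj : j ≤ merged.length)
    (hO : (orig.drop i).Pairwise (· ≤ ·)) (hM : (merged.drop j).Pairwise (· ≤ ·))
    (hne : orig.drop i ≠ [] ∨ merged.drop j ≠ []) :
    (∀ y ∈ orig.drop i ++ merged.drop j, (nextB orig merged i j).1 ≤ y) ∧
    (((nextB orig merged i j).2.1 = i + 1 ∧ (nextB orig merged i j).2.2 = j ∧
        orig.drop i = (nextB orig merged i j).1 :: orig.drop (i + 1)) ∨
     ((nextB orig merged i j).2.1 = i ∧ (nextB orig merged i j).2.2 = j + 1 ∧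
        merged.drop j = (nextB orig merged i j).1 :: merged.drop (j + 1))) := by
  unfold nextB
  by_cases hc : i < orig.length ∧ (merged.length ≤ j ∨ orig.getD i 0 ≤ merged.getD j 0)
  · obtain ⟨hilt, hc2⟩ := hc
    simp only [if_pos (And.intro hilt hc2)]
    have hdec : orig.drop i = orig[i] :: orig.drop (i + 1) :=
      List.drop_eq_getElem_cons hilt
    have hget : orig.getD i 0 = orig[i] := List.getD_eq_getElem orig 0 hilt
    constructor
    · intro y hy
      rcases List.mem_append.mp hy with h | h
      · rw [hdec] at h hO
        rcases List.mem_cons.mp h with h | h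
        · omega
        · have := (List.pairwise_cons.mp hO).1 y h; omega
      · -- y in merged side: merged empty after j, or front comparison
        rcases hc2 with h2 | h2
        · rw [List.drop_eq_nil_of_le h2] at h; cases h
        · have hjlt : j < merged.length := by
            by_contra hh
            rw [List.drop_eq_nil_of_le (by omega)] at h; cases h
          have hdm : merged.drop j = merged[j] :: merged.drop (j + 1) :=
            List.drop_eq_getElem_cons hjlt
          have hgm : merged.getD j 0 = merged[j] := List.getD_eq_getElem merged 0 hjlt
          rw [hdm] at h hM
          rcases List.mem_cons.mp h with h | h
          · omega
          · have := (List.pairwise_cons.mp hM).1 y h; omega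
    · left; exact ⟨by trivial, by trivial, by rw [hget]; exact hdec⟩
  · simp only [if_neg hc]
    have hjlt : j < merged.length := by
      by_contra hh
      have hMe : merged.drop j = [] := List.drop_eq_nil_of_le (by omega)
      rcases hne with h | h
      · -- orig side nonempty: then i < length and merged.length ≤ j, so hc holds
        have hilt : i < orig.length := by
          by_contra h2; exact h (List.drop_eq_nil_of_le (by omega))
        exact hc ⟨hilt, Or.inl (by omega)⟩
      · exact h hMe
    have hdm : merged.drop j = merged[j] :: merged.drop (j + 1) :=
      List.drop_eq_getElem_cons hjlt
    have hgm : merged.getD j 0 = merged[j] := List.getD_eq_getElem merged 0 hjlt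
    constructor
    · intro y hy
      rcases List.mem_append.mp hy with h | h
      · -- orig side: i ≥ length (then vacuous) or merged front < orig front
        have hilt : i < orig.length := by
          by_contra h2; rw [List.drop_eq_nil_of_le (by omega)] at h; cases h
        have hlt : merged.getD j 0 < orig.getD i 0 := by
          by_contra h2
          exact hc ⟨hilt, Or.inr (by omega)⟩
        have hdec : orig.drop i = orig[i] :: orig.drop (i + 1) :=
          List.drop_eq_getElem_cons hilt
        have hget : orig.getD i 0 = orig[i] := List.getD_eq_getElem orig 0 hilt
        rw [hdec] at h hO
        rcases List.mem_cons.mp h with h | h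
        · omega
        · have := (List.pairwise_cons.mp hO).1 y h; omega
      · rw [hdm] at h hM
        rcases List.mem_cons.mp h with h | h
        · omega
        · have := (List.pairwise_cons.mp hM).1 y h; omega
    · right; exact ⟨by trivial, by trivial, by rw [hgm]; exact hdm⟩

-- the head of a list with nonempty tail lies in its dropLast
theorem head_mem_dropLast (x : Int) (t : List Int) (ht : t ≠ []) :
    x ∈ (x :: t).dropLast := by
  rcases t with _ | ⟨y, s⟩
  · cases ht rfl
  · simp

theorem mem_dropLast_cons (x y : Int) (t : List Int) (hy : y ∈ t.dropLast) :
    y ∈ (x :: t).dropLast := by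
  rcases t with _ | ⟨z, s⟩
  · cases hy
  · simp at hy ⊢; tauto

-- main invariant: A's heap is a permutation of B's two unread sorted suffixes,
-- and everything outside the merged queue's back m is ≥ m/3
theorem loop_eq (K : Int) : ∀ (fuel : Nat) (heap orig merged : List Int) (i j : Nat) (answer : Int),
    i ≤ orig.length → j ≤ merged.length →
    (orig.length - i) + (merged.length - j) ≤ fuel →
    heap.Perm (orig.drop i ++ merged.drop j) →
    (orig.drop i).Pairwise (· ≤ ·) → (merged.drop j).Pairwise (· ≤ ·) →
    (∀ m, (merged.drop j).getLast? = some m →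
      ∀ y ∈ orig.drop i ++ (merged.drop j).dropLast, m ≤ 3 * y) →
    loopA K answer heap = loopB fuel K orig merged i j answer := by
  intro fuel
  induction fuel with
  | zero =>
    intro heap orig merged i j answer hi hj hcnt hp _ _ _
    -- no unread elements: the heap is empty, both sides return the 0 sentinel
    have h1 : orig.drop i = [] := List.drop_eq_nil_of_le (by omega)
    have h2 : merged.drop j = [] := List.drop_eq_nil_of_le (by omega)
    rw [h1, h2] at hp
    have : heap = [] := List.Perm.eq_nil hp
    subst this
    rw [loopA, loopB]
    simp [PySem.List.min?]
  | succ fuel ih =>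
    intro heap orig merged i j answer hi hj hcnt hp hO hM hI
    have hlenO : (orig.drop i).length = orig.length - i := List.length_drop
    have hlenM : (merged.drop j).length = merged.length - j := List.length_drop
    have hheaplen : heap.length = (orig.length - i) + (merged.length - j) := by
      rw [hp.length_eq, List.length_append, hlenO, hlenM]
    by_cases hg : 2 ≤ (orig.length - i) + (merged.length - j)
    · -- loop body
      have hne : orig.drop i ≠ [] ∨ merged.drop j ≠ [] := by
        by_contra h
        push_neg at h
        have e1 := h.1; have e2 := h.2
        have := congrArg List.length e1
        have := congrArg List.length e2
        simp [hlenO, hlenM] at *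
        omega
      have hspec1 := nextB_spec orig merged i j hi hj hO hM hne
      rcases hr1 : nextB orig merged i j with ⟨a, i2, j2⟩
      rw [hr1] at hspec1
      dsimp only at hspec1
      obtain ⟨hmin1, hcase1⟩ := hspec1
      -- bounds and sortedness after the first pop
      have hstep1 : i2 ≤ orig.length ∧ j2 ≤ merged.length ∧ i2 + j2 = i + j + 1 ∧
          (orig.drop i ++ merged.drop j).Perm (a :: (orig.drop i2 ++ merged.drop j2)) ∧
          (orig.drop i2).Pairwise (· ≤ ·) ∧ (merged.drop j2).Pairwise (· ≤ ·) := by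
        rcases hcase1 with ⟨e1, e2, e3⟩ | ⟨e1, e2, e3⟩
        · have hlt : i < orig.length := by
            by_contra h
            rw [List.drop_eq_nil_of_le (by omega)] at e3; cases e3
          refine ⟨by omega, by omega, by omega, ?_, ?_, ?_⟩
          · rw [e1, e2, e3]; rfl
          · rw [e1]; rw [e3] at hO; exact (List.pairwise_cons.mp hO).2
          · rw [e2]; exact hM
        · have hlt : j < merged.length := by
            by_contra h
            rw [List.drop_eq_nil_of_le (by omega)] at e3; cases e3
          refine ⟨by omega, by omega, by omega, ?_, ?_, ?_⟩
          · rw [e1, e2, e3]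
            exact List.perm_middle
          · rw [e1]; exact hO
          · rw [e2]; rw [e3] at hM; exact (List.pairwise_cons.mp hM).2
      obtain ⟨hi2, hj2, hij2, hperm1, hO2, hM2⟩ := hstep1
      have hne2 : orig.drop i2 ≠ [] ∨ merged.drop j2 ≠ [] := by
        by_contra h
        push_neg at h
        have := congrArg List.length h.1
        have := congrArg List.length h.2
        simp [List.length_drop] at *
        omega
      have hspec2 := nextB_spec orig merged i2 j2 hi2 hj2 hO2 hM2 hne2
      rcases hr2 : nextB orig merged i2 j2 with ⟨b, i3, j3⟩
      rw [hr2] at hspec2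
      dsimp only at hspec2
      obtain ⟨hmin2, hcase2⟩ := hspec2
      have hstep2 : i3 ≤ orig.length ∧ j3 ≤ merged.length ∧ i3 + j3 = i2 + j2 + 1 ∧
          (orig.drop i2 ++ merged.drop j2).Perm (b :: (orig.drop i3 ++ merged.drop j3)) ∧
          (orig.drop i3).Pairwise (· ≤ ·) ∧ (merged.drop j3).Pairwise (· ≤ ·) := by
        rcases hcase2 with ⟨e1, e2, e3⟩ | ⟨e1, e2, e3⟩
        · have hlt : i2 < orig.length := by
            by_contra h
            rw [List.drop_eq_nil_of_le (by omega)] at e3; cases e3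
          refine ⟨by omega, by omega, by omega, ?_, ?_, ?_⟩
          · rw [e1, e2, e3]; rfl
          · rw [e1]; rw [e3] at hO2; exact (List.pairwise_cons.mp hO2).2
          · rw [e2]; exact hM2
        · have hlt : j2 < merged.length := by
            by_contra h
            rw [List.drop_eq_nil_of_le (by omega)] at e3; cases e3
          refine ⟨by omega, by omega, by omega, ?_, ?_, ?_⟩
          · rw [e1, e2, e3]
            exact List.perm_middle
          · rw [e1]; exact hO2
          · rw [e2]; rw [e3] at hM2; exact (List.pairwise_cons.mp hM2).2
      obtain ⟨hi3, hj3, hij3, hperm2, hO3, hM3⟩ := hstep2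
      set v := a + 2 * b with hv
      have hab : a ≤ b := by
        have hbmem : b ∈ orig.drop i ++ merged.drop j := by
          have : b ∈ a :: (orig.drop i2 ++ merged.drop j2) := by
            rcases hcase2 with ⟨_, _, e3⟩ | ⟨_, _, e3⟩
            · exact List.mem_cons_of_mem a (List.mem_append.mpr (Or.inl (by rw [e3]; simp)))
            · exact List.mem_cons_of_mem a (List.mem_append.mpr (Or.inr (by rw [e3]; simp)))
          exact hperm1.symm.subset this
        exact hmin1 b hbmem
      -- remaining elements are ≥ b
      have hrem : ∀ y ∈ orig.drop i3 ++ merged.drop j3, b ≤ y := by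
        intro y hy
        have : y ∈ orig.drop i2 ++ merged.drop j2 :=
          hperm2.symm.subset (List.mem_cons_of_mem b hy)
        exact hmin2 y this
      -- key step: the appended mix v is ≥ every surviving merged element
      have hvtop : ∀ y ∈ merged.drop j3, y ≤ v := by
        intro y hy
        have hyM : y ∈ merged.drop j := by
          have h23 : merged.drop j3 = (merged.drop j).drop (j3 - j) := by
            rw [List.drop_drop]
            congr 1
            omega
          rw [h23] at hy
          exact List.mem_of_mem_drop hy
        have hMne : merged.drop j ≠ [] := by intro h; rw [h] at hyM; cases hyM
        obtain ⟨m, hm⟩ : ∃ m, (merged.drop j).getLast? = some m := by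
          cases h : (merged.drop j).getLast? with
          | none => exact absurd (List.getLast?_eq_none_iff.mp h) hMne
          | some m => exact ⟨m, rfl⟩
        have hym : y ≤ m := sorted_le_getLast _ hM m hm y hyM
        -- show m ≤ 3a and m ≤ 3b via the invariant
        have hI' := hI m hm
        have hj3j : j3 ≤ j + 2 := by omega
        have hmb : m ≤ 3 * a ∧ m ≤ 3 * b := by
          rcases hcase1 with ⟨e1, e2, e3⟩ | ⟨e1, e2, e3⟩
          · -- a from orig
            have ha' : m ≤ 3 * a :=
              hI' a (List.mem_append.mpr (Or.inl (by rw [e3]; simp)))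
            rcases hcase2 with ⟨f1, f2, f3⟩ | ⟨f1, f2, f3⟩
            · -- b from orig too
              have hbO : b ∈ orig.drop i := by
                rw [e3]
                rw [e1] at f3
                exact List.mem_cons_of_mem a (by rw [f3]; simp)
              exact ⟨ha', hI' b (List.mem_append.mpr (Or.inl hbO))⟩
            · -- b = head of merged.drop j (j2 = j)
              rw [e2] at f3
              have htail : merged.drop (j + 1) ≠ [] := by
                intro h
                rw [f2, e2] at hy
                rw [h] at hy; cases hy
              have hbdl : b ∈ (merged.drop j).dropLast := by
                rw [f3]; exact head_mem_dropLast b _ htail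
              exact ⟨ha', hI' b (List.mem_append.mpr (Or.inr hbdl))⟩
          · -- a = head of merged.drop j
            have htail1 : merged.drop (j + 1) ≠ [] := by
              intro h
              rcases hcase2 with ⟨f1, f2, f3⟩ | ⟨f1, f2, f3⟩
              · -- j3 = j2 = j+1
                rw [f2, e2] at hy; rw [h] at hy; cases hy
              · -- b from merged too: drop (j+1) = b :: drop (j+2)
                rw [e2] at f3
                rw [h] at f3
                simp at f3
            have hadl : a ∈ (merged.drop j).dropLast := by
              rw [e3]; exact head_mem_dropLast a _ htail1
            have ha' : m ≤ 3 * a := hI' a (List.mem_append.mpr (Or.inr hadl))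
            rcases hcase2 with ⟨f1, f2, f3⟩ | ⟨f1, f2, f3⟩
            · -- b from orig
              have hbO : b ∈ orig.drop i := by
                rw [e1] at f3
                rw [f3]; simp
              exact ⟨ha', hI' b (List.mem_append.mpr (Or.inl hbO))⟩
            · -- b = head of merged.drop (j+1)
              rw [e2] at f3
              have htail2 : merged.drop (j + 2) ≠ [] := by
                intro h
                have : j3 = j + 2 := by omega
                rw [this, h] at hy; cases hy
              have hbdl : b ∈ (merged.drop j).dropLast := by
                rw [e3]
                apply mem_dropLast_cons
                rw [f3]
                exact head_mem_dropLast b _ (by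
                  have : merged.drop (j + 1 + 1) = merged.drop (j + 2) := by norm_num
                  rw [this]; exact htail2)
              exact ⟨ha', hI' b (List.mem_append.mpr (Or.inr hbdl))⟩
        omega
      -- the new merged suffix is sorted
      have hdropappend : (merged ++ [v]).drop j3 = merged.drop j3 ++ [v] :=
        List.drop_append_of_le_length hj3
      have hMnew : ((merged ++ [v]).drop j3).Pairwise (· ≤ ·) := by
        rw [hdropappend]
        rw [List.pairwise_append]
        exact ⟨hM3, List.pairwise_singleton _ _, fun y hy v' hv' => by
          simp at hv'; subst hv'; exact hvtop y hy⟩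
      -- the new invariant
      have hInew : ∀ m, ((merged ++ [v]).drop j3).getLast? = some m →
          ∀ y ∈ orig.drop i3 ++ ((merged ++ [v]).drop j3).dropLast, m ≤ 3 * y := by
        intro m hm y hy
        rw [hdropappend] at hm hy
        rw [List.getLast?_concat] at hm
        have hmv : m = v := by injection hm with h; omega
        rw [List.dropLast_concat] at hy
        have hby := hrem y hy
        omega
      -- the new permutation
      have hpermnew : ((heap.erase a).erase b ++ [v]).Perm
          (orig.drop i3 ++ (merged ++ [v]).drop j3) := by
        have h1 : (heap.erase a).Perm (orig.drop i2 ++ merged.drop j2) := by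
          have := (hp.trans hperm1).erase a
          simpa using this
        have h2 : ((heap.erase a).erase b).Perm (orig.drop i3 ++ merged.drop j3) := by
          have := (h1.trans hperm2).erase b
          simpa using this
        rw [hdropappend]
        have h3 := h2.append_right [v]
        rwa [List.append_assoc] at h3
      -- A's side: the heap's min is a, then b
      have hamem : a ∈ heap := hp.symm.subset (hperm1.symm.subset (List.mem_cons_self))
      have hamin : ∀ y ∈ heap, a ≤ y := fun y hy => hmin1 y (hp.subset hy)
      have hmina : PySem.List.min? heap (fun x => x) = some a := min?_eq_of_min heap a hamem hamin
      have h1 : (heap.erase a).Perm (orig.drop i2 ++ merged.drop j2) := by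
        have := (hp.trans hperm1).erase a
        simpa using this
      have hbmem : b ∈ heap.erase a := h1.symm.subset (hperm2.symm.subset (List.mem_cons_self))
      have hbmin : ∀ y ∈ heap.erase a, b ≤ y := fun y hy => hmin2 y (h1.subset hy)
      have hminb : PySem.List.min? (heap.erase a) (fun x => x) = some b :=
        min?_eq_of_min (heap.erase a) b hbmem hbmin
      have hhl : 2 ≤ heap.length := by omega
      -- unfold one step on each side
      rw [loopA, loopB]
      rw [hmina]
      simp only [hr1, hr2, if_pos hhl, if_pos hg]
      by_cases hK : a ≥ K
      · simp [hK]
      · simp only [ge_iff_le] at hK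
        simp only [ge_iff_le, if_neg hK]
        split
        · rename_i hb; rw [hminb] at hb; cases hb
        · rename_i b' hb
          rw [hminb] at hb
          injection hb with hb
          subst hb
          -- recurse with the re-established invariant
          exact ih ((heap.erase a).erase b ++ [v]) orig (merged ++ [v]) i3 j3 (answer + 1)
            hi3 (by simp; omega)
            (by simp only [List.length_append, List.length_singleton]; omega)
            hpermnew hO3 hMnew hInew
    · -- loop exit: at most one unread element
      rw [loopA, loopB]
      simp only [if_neg hg]
      have hle1 : heap.length ≤ 1 := by omega
      rcases hhp : heap with _ | ⟨x, _ | t⟩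
      · -- empty: both sentinels 0
        subst hhp
        have h1 : orig.drop i = [] := by
          have := hp.length_eq; simp [hlenO, hlenM] at this
          exact List.eq_nil_of_length_eq_zero (by rw [hlenO]; omega)
        have h2 : merged.drop j = [] := by
          have := hp.length_eq; simp [hlenO, hlenM] at this
          exact List.eq_nil_of_length_eq_zero (by rw [hlenM]; omega)
        have hio : ¬ i < orig.length := by
          have := congrArg List.length h1; simp [List.length_drop] at this; omega
        simp [PySem.List.min?, hio, h2]
      · -- singleton x
        subst hhp
        have hx : [x].Perm (orig.drop i ++ merged.drop j) := hp
        have hlen1 : (orig.length - i) + (merged.length - j) = 1 := by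
          have := hx.length_eq; simp [hlenO, hlenM] at this; omega
        have hminx : PySem.List.min? [x] (fun x => x) = some x := by
          simp [PySem.List.min?]
        rw [hminx]
        simp only [if_neg (by norm_num : ¬ 2 ≤ ([x] : List Int).length)]
        by_cases hio : i < orig.length
        · -- the single element is orig[i]
          have hMe : merged.drop j = [] := List.drop_eq_nil_of_le (by omega)
          have hOx : orig.drop i = [x] := by
            rw [hMe, List.append_nil] at hx
            exact (List.Perm.eq_singleton hx.symm)
          have h1 : orig[i] = x := by
            have hd := List.drop_eq_getElem_cons hio
            rw [hd] at hOx
            exact (List.cons.injEq _ _ _ _ ▸ hOx :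
              orig[i] = x ∧ _).1
          simp [hio, h1]
        · have hOe : orig.drop i = [] := List.drop_eq_nil_of_le (by omega)
          have hMx : merged.drop j = [x] := by
            rw [hOe, List.nil_append] at hx
            exact (List.Perm.eq_singleton hx.symm)
          simp [hio, hMx]
      · -- length ≥ 2 contradicts the failed guard
        subst hhp
        simp at hle1

theorem foldl_push (scoville : List Int) :
    scoville.foldl (fun q s => q ++ [s]) [] = scoville := by
  have h : ∀ (l acc : List Int), l.foldl (fun q s => q ++ [s]) acc = acc ++ l := by
    intro l
    induction l with
    | nil => simp
    | cons x xs ih => intro acc; simp [List.foldl, ih]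
  simpa using h scoville []

-- ===== VERDICT (by name: the statement is the Claim_ definition above) =====
theorem solution_spec : Claim_equal_solution := by
  intro scoville K _hdom _hpre
  unfold Spec_solution solution solution_alt
  rw [foldl_push]
  exact loop_eq K (scoville.length + 1) scoville
    (PySem.List.sorted scoville (fun x => x) false) [] 0 0 0
    (by simp [PySem.List.length_sorted]) (by simp)
    (by simp [PySem.List.length_sorted])
    (by simpa using (PySem.List.sorted_perm scoville (fun x => x) false).symm)
    (by simpa using PySem.List.sorted_pairwise scoville (fun x => x))
    (by simp)
    (by intro m hm; simp at hm)
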